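-- pv_equiv track=rewrite | github.com/michaelrendier/Ptolemy | Philadelphos/Ainulindale/sonification/ainulindale_beginning_of_light.py | noise_seed
-- ===== SOURCE A (Python) =====
-- def noise_seed(n, amp, seed=1):
--     """Deterministic structured noise for vacuum perturbations."""
--     a, c, m = 6364136223846793005, 1442695040888963407, 2**64
--     s = seed
--     out = []
--     for i in range(n):
--         s = (a*s+c) % m
--         raw = int((s % (2*amp)) - amp) // 4  # quiet
--         out.append(max(-32767, min(32767, raw)))
--     return out
-- ===== SOURCE B (Python) =====
-- def noise_seed(n, amp, seed=1):
--     """Deterministic structured noise for vacuum perturbations."""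
--     a, c, m = 6364136223846793005, 1442695040888963407, 2**64
--     # closed form: the i-th LCG state is a^i*seed + c*(1 + a + ... + a^(i-1)) mod m.
--     # Fill both tables by index-halving (a^i from a^(i//2), geometric sum by the
--     # doubling identity G(2h) = G(h)*(1 + a^h)), then map the closed form over them.
--     pw = [1]  # pw[k] = a**k % m
--     gs = [0]  # gs[k] = (1 + a + ... + a**(k-1)) % m
--     for i in range(1, n + 1):
--         h = i // 2
--         pw.append(pw[h] * pw[h] * (a if i % 2 else 1) % m)
--         if i % 2:
--             gs.append((1 + a * gs[i - 1]) % m)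
--         else:
--             gs.append(gs[h] * (1 + pw[h]) % m)
--     return [max(-32767, min(32767, ((pw[i] * seed + c * gs[i]) % m % (2 * amp) - amp) // 4))
--             for i in range(1, n + 1)]
-- ===== Notes on version B (the rewrite author's own statement) =====
-- stated objective: alternative
-- what changed: B drops A's sequential LCG recurrence: it computes each i-th state by its closed form a^i*seed + c*(1+a+...+a^(i-1)) mod 2^64, filling the power and geometric-sum tables by index-halving identities, then maps the closed form over the tables.
import Mathlib
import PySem

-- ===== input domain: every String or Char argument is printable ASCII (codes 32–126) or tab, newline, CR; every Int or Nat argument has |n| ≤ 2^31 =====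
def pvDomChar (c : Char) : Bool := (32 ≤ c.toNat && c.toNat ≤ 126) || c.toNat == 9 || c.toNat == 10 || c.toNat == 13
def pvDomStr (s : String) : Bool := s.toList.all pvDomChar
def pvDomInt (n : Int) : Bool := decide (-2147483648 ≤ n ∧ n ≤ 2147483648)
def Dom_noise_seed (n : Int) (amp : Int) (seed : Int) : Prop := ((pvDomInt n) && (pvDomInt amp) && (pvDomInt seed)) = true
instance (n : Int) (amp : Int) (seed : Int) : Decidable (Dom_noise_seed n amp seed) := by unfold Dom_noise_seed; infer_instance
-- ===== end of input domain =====

-- B replaces A's sequential LCG recurrence by the closed form of the i-th state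
-- (a^i*seed + c*(a^(i-1)+...+1) mod m, geometric sum by recursive doubling): alternative algorithm, same exact values.

-- ===== PORT A =====
-- A's for-loop: each iteration steps the state s and appends one clamped sample.
def noiseLoopA (amp : Int) : Nat → Int → List Int
  | 0, _ => []
  | k+1, s =>
      let s' := PySem.Int.mod (6364136223846793005 * s + 1442695040888963407) (2^64)
      let raw := PySem.Int.floordiv (PySem.Int.mod s' (2 * amp) - amp) 4
      max (-32767) (min 32767 raw) :: noiseLoopA amp k s'

def noise_seed (n : Int) (amp : Int) (seed : Int) : List Int :=
  noiseLoopA amp n.toNat seed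

-- ===== PORT B =====
-- closed form: the i-th LCG state is a^i*seed + c*(1+a+...+a^(i-1)) mod m;
-- both tables are filled by index-halving, then the closed form is mapped over them.
def noise_seed_alt (n : Int) (amp : Int) (seed : Int) : List Int :=
  let t := (PySem.List.pyRange 1 (n+1) 1).foldl (fun t i =>
      let h := PySem.Int.floordiv i 2
      let ph := PySem.List.pyGetD t.1 h 0
      (t.1 ++ [PySem.Int.mod (ph * ph * (if PySem.Int.mod i 2 ≠ 0 then 6364136223846793005 else 1)) (2^64)],
       t.2 ++ [if PySem.Int.mod i 2 ≠ 0
               then PySem.Int.mod (1 + 6364136223846793005 * PySem.List.pyGetD t.2 (i-1) 0) (2^64)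
               else PySem.Int.mod (PySem.List.pyGetD t.2 h 0 * (1 + ph)) (2^64)]))
    (([1], [0]) : List Int × List Int)
  (PySem.List.pyRange 1 (n+1) 1).map (fun i =>
    max (-32767) (min 32767 (PySem.Int.floordiv
      (PySem.Int.mod (PySem.Int.mod
        (PySem.List.pyGetD t.1 i 0 * seed + 1442695040888963407 * PySem.List.pyGetD t.2 i 0) (2^64))
        (2 * amp) - amp) 4)))

-- ===== PRECONDITION & SPEC =====
-- Pre_ excludes only inputs where Python raises ZeroDivisionError (s % (2*amp) with amp = 0 and n >= 1); both A and B raise there.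
def Pre_noise_seed (n : Int) (amp : Int) (seed : Int) : Prop := amp ≠ 0 ∨ n ≤ 0
instance (n : Int) (amp : Int) (seed : Int) : Decidable (Pre_noise_seed n amp seed) := by unfold Pre_noise_seed; infer_instance
def pvWitness_noise_seed : Int × Int × Int := (3, 5, 1)
def Spec_noise_seed (n : Int) (amp : Int) (seed : Int) (out : List Int) : Prop := out = noise_seed_alt n amp seed
instance (n : Int) (amp : Int) (seed : Int) (out : List Int) : Decidable (Spec_noise_seed n amp seed out) := by unfold Spec_noise_seed; infer_instance

-- ===== CLAIM (what is proved, stated in full; the proofs are below) =====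
def Claim_equal_noise_seed : Prop := ∀ (n : Int) (amp : Int) (seed : Int), Dom_noise_seed n amp seed → Pre_noise_seed n amp seed → Spec_noise_seed n amp seed (noise_seed n amp seed)

-- ===== LEMMAS AND PROOFS =====

-- exact (un-reduced) geometric sum 1 + a + ... + a^(k-1), in Horner form
def geoS : Nat → Int
  | 0 => 0
  | k+1 => 1 + 6364136223846793005 * geoS k

-- the iterated LCG state: lcgIter k s = state after k steps from s
def lcgIter : Nat → Int → Int
  | 0, s => s
  | j+1, s => (6364136223846793005 * lcgIter j s + 1442695040888963407) % 2^64

-- the per-state sample mapping (proof-side name for the expression both ports inline)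
def pvSample (amp s : Int) : Int :=
  max (-32767) (min 32767 (PySem.Int.floordiv (PySem.Int.mod s (2 * amp) - amp) 4))

theorem geoS_succ' (k : Nat) : geoS (k+1) = geoS k + 6364136223846793005 ^ k := by
  induction k with
  | zero => simp [geoS]
  | succ k ih =>
    calc geoS (k+2) = 1 + 6364136223846793005 * geoS (k+1) := rfl
    _ = 1 + 6364136223846793005 * (geoS k + 6364136223846793005 ^ k) := by rw [ih]
    _ = geoS (k+1) + 6364136223846793005 ^ (k+1) := by simp [geoS]; ring

theorem geoS_add (m n : Nat) : geoS (m + n) = geoS m + 6364136223846793005 ^ m * geoS n := by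
  induction n with
  | zero => simp [geoS]
  | succ n ih =>
    calc geoS (m + (n+1)) = geoS ((m+n)+1) := by ring_nf
    _ = geoS (m+n) + 6364136223846793005 ^ (m+n) := geoS_succ' _
    _ = geoS m + 6364136223846793005 ^ m * (geoS n + 6364136223846793005 ^ n) := by
          rw [ih]; ring
    _ = geoS m + 6364136223846793005 ^ m * geoS (n+1) := by rw [geoS_succ' n]

theorem emod_self_modEq (x m : Int) : x % m ≡ x [ZMOD m] :=
  Int.emod_emod_of_dvd x dvd_rfl

-- stepping first commutes with iterating
theorem lcgIter_step (j : Nat) (s : Int) :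
    lcgIter j ((6364136223846793005 * s + 1442695040888963407) % 2^64) = lcgIter (j+1) s := by
  induction j with
  | zero => rfl
  | succ j ih => simp only [lcgIter, ih]

-- closed form of the (j+1)-th state
theorem lcgIter_closed (j : Nat) (s : Int) :
    lcgIter (j+1) s = (6364136223846793005 ^ (j+1) * s + 1442695040888963407 * geoS (j+1)) % 2^64 := by
  induction j with
  | zero => simp [lcgIter, geoS]
  | succ j ih =>
    calc lcgIter (j+2) s
        = (6364136223846793005 * lcgIter (j+1) s + 1442695040888963407) % 2^64 := rfl
      _ = (6364136223846793005 ^ (j+2) * s + 1442695040888963407 * geoS (j+2)) % 2^64 := by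
          rw [ih]
          calc (6364136223846793005 *
                  ((6364136223846793005 ^ (j+1) * s + 1442695040888963407 * geoS (j+1)) % 2^64)
                + 1442695040888963407)
              ≡ 6364136223846793005 *
                  (6364136223846793005 ^ (j+1) * s + 1442695040888963407 * geoS (j+1))
                + 1442695040888963407 [ZMOD 2^64] :=
                Int.ModEq.add_right _ ((emod_self_modEq _ _).mul_left _)
            _ = 6364136223846793005 ^ (j+2) * s + 1442695040888963407 * geoS (j+2) := by
                simp [geoS]; ring

-- A's loop computes the sample of each iterated state
theorem loopA_eq (amp : Int) (k : Nat) (s : Int) :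
    noiseLoopA amp k s = (List.range k).map (fun j => pvSample amp (lcgIter (j+1) s)) := by
  induction k generalizing s with
  | zero => rfl
  | succ k ih =>
    rw [noiseLoopA, List.range_succ_eq_map]
    simp only [List.map_cons, List.map_map]
    congr 1
    · simp [pvSample, lcgIter]
    · rw [ih, PySem.Int.mod_eq_emod_of_pos (show (0:Int) < 2^64 by norm_num)]
      refine List.map_congr_left (fun j _ => ?_)
      simp only [Function.comp_apply, lcgIter_step, Nat.succ_eq_add_one]

-- B's comprehension computes the same samples
-- proof-side names for the two table entries
def pwF (k : Nat) : Int := 6364136223846793005 ^ k % 2^64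
def gsF (k : Nat) : Int := geoS k % 2^64

theorem geo_odd_mod (k : Nat) :
    PySem.Int.mod (1 + 6364136223846793005 * gsF k) (2^64) = gsF (k+1) := by
  rw [gsF, gsF, PySem.Int.mod_eq_emod_of_pos (show (0:Int) < 2^64 by norm_num)]
  calc (1 + 6364136223846793005 * (geoS k % 2^64))
      ≡ 1 + 6364136223846793005 * geoS k [ZMOD 2^64] :=
        Int.ModEq.add_left 1 ((emod_self_modEq _ _).mul_left _)
    _ = geoS (k+1) := rfl

theorem geo_even_mod (h : Nat) :
    PySem.Int.mod (gsF h * (1 + pwF h)) (2^64) = gsF (h+h) := by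
  rw [gsF, gsF, pwF, PySem.Int.mod_eq_emod_of_pos (show (0:Int) < 2^64 by norm_num)]
  have hs : geoS (h+h) = geoS h * (1 + 6364136223846793005 ^ h) := by rw [geoS_add]; ring
  rw [hs]
  exact (emod_self_modEq _ _).mul (Int.ModEq.add_left 1 (emod_self_modEq _ _))

theorem pow_even_mod (h : Nat) :
    PySem.Int.mod (pwF h * pwF h) (2^64) = pwF (h+h) := by
  rw [pwF, pwF, PySem.Int.mod_eq_emod_of_pos (show (0:Int) < 2^64 by norm_num)]
  calc (6364136223846793005 ^ h % 2^64) * (6364136223846793005 ^ h % 2^64)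
      ≡ 6364136223846793005 ^ h * 6364136223846793005 ^ h [ZMOD 2^64] :=
        (emod_self_modEq _ _).mul (emod_self_modEq _ _)
    _ = 6364136223846793005 ^ (h+h) := by rw [pow_add]

theorem pow_odd_mod (h : Nat) :
    PySem.Int.mod (pwF h * pwF h * 6364136223846793005) (2^64) = pwF (h+h+1) := by
  rw [pwF, pwF, PySem.Int.mod_eq_emod_of_pos (show (0:Int) < 2^64 by norm_num)]
  calc (6364136223846793005 ^ h % 2^64) * (6364136223846793005 ^ h % 2^64) * 6364136223846793005
      ≡ 6364136223846793005 ^ h * 6364136223846793005 ^ h * 6364136223846793005 [ZMOD 2^64] :=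
        ((emod_self_modEq _ _).mul (emod_self_modEq _ _)).mul_right _
    _ = 6364136223846793005 ^ (h+h+1) := by rw [pow_add, pow_add, pow_one]

-- the closed-form state from the tables is the iterated state
theorem closed_state (k : Nat) (seed : Int) :
    PySem.Int.mod (pwF (k+1) * seed + 1442695040888963407 * gsF (k+1)) (2^64) = lcgIter (k+1) seed := by
  rw [pwF, gsF, lcgIter_closed, PySem.Int.mod_eq_emod_of_pos (show (0:Int) < 2^64 by norm_num)]
  exact ((emod_self_modEq _ _).mul_right seed).add ((emod_self_modEq _ _).mul_left _)

-- B's fold fills exactly the two closed-form tables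
theorem tablesB (j : Nat) :
    ((PySem.List.pyRange 1 ((j:Int)+1) 1).foldl (fun t i =>
      let h := PySem.Int.floordiv i 2
      let ph := PySem.List.pyGetD t.1 h 0
      (t.1 ++ [PySem.Int.mod (ph * ph * (if PySem.Int.mod i 2 ≠ 0 then 6364136223846793005 else 1)) (2^64)],
       t.2 ++ [if PySem.Int.mod i 2 ≠ 0
               then PySem.Int.mod (1 + 6364136223846793005 * PySem.List.pyGetD t.2 (i-1) 0) (2^64)
               else PySem.Int.mod (PySem.List.pyGetD t.2 h 0 * (1 + ph)) (2^64)]))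
      (([1], [0]) : List Int × List Int))
    = ((List.range (j+1)).map pwF, (List.range (j+1)).map gsF) := by
  induction j with
  | zero =>
    rw [PySem.List.pyRange_one_eq_nil (by norm_num)]
    simp [pwF, gsF, geoS]
  | succ j ih =>
    rw [show ((j+1:Nat):Int) + 1 = ((j:Int)+1) + 1 by push_cast; ring,
        PySem.List.pyRange_one_succ_right (by omega), List.foldl_append, ih]
    simp only [List.foldl_cons, List.foldl_nil]
    have hfd : PySem.Int.floordiv ((j:Int)+1) 2 = (((j+1)/2 : Nat) : Int) := by
      rw [show ((j:Int)+1) = ((j+1 : Nat) : Int) by push_cast; ring]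
      exact_mod_cast PySem.Int.floordiv_natCast (j+1) 2
    have hmd : PySem.Int.mod ((j:Int)+1) 2 = (((j+1) % 2 : Nat) : Int) := by
      rw [show ((j:Int)+1) = ((j+1 : Nat) : Int) by push_cast; ring]
      exact_mod_cast PySem.Int.mod_natCast (j+1) 2
    have hpw : PySem.List.pyGetD ((List.range (j+1)).map pwF) (((j+1)/2 : Nat) : Int) 0 = pwF ((j+1)/2) := by
      rw [PySem.List.pyGetD_natCast]
      exact PySem.List.getD_map_range pwF (j+1) ((j+1)/2) 0 (by omega)
    have hgs : PySem.List.pyGetD ((List.range (j+1)).map gsF) (((j+1)/2 : Nat) : Int) 0 = gsF ((j+1)/2) := by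
      rw [PySem.List.pyGetD_natCast]
      exact PySem.List.getD_map_range gsF (j+1) ((j+1)/2) 0 (by omega)
    have hgsj : PySem.List.pyGetD ((List.range (j+1)).map gsF) (((j:Int)+1) - 1) 0 = gsF j := by
      rw [show ((j:Int)+1) - 1 = ((j:Nat):Int) by ring, PySem.List.pyGetD_natCast]
      exact PySem.List.getD_map_range gsF (j+1) j 0 (by omega)
    simp only [hfd, hmd, hpw, hgs, hgsj]
    rw [show List.range (j+1+1) = List.range (j+1) ++ [j+1] from List.range_succ, List.map_append, List.map_append]
    by_cases hpar : (j+1) % 2 = 0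
    · have h2 : (j+1)/2 + (j+1)/2 = j+1 := by omega
      simp only [hpar, Nat.cast_zero, ne_eq, not_true_eq_false, if_false]
      rw [mul_one, pow_even_mod, geo_even_mod, h2]
      simp
    · have hpar1 : (j+1) % 2 = 1 := by omega
      have h2 : (j+1)/2 + (j+1)/2 + 1 = j+1 := by omega
      simp only [hpar1, Nat.cast_one, ne_eq, one_ne_zero, not_false_eq_true, if_true]
      rw [pow_odd_mod, geo_odd_mod, h2]
      simp

-- B computes the same samples
theorem altB_eq (n amp seed : Int) :
    noise_seed_alt n amp seed = (List.range n.toNat).map (fun j => pvSample amp (lcgIter (j+1) seed)) := by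
  by_cases hn : 0 ≤ n
  · have hcast : n = ((n.toNat : Nat) : Int) := (Int.toNat_of_nonneg hn).symm
    unfold noise_seed_alt
    rw [hcast, tablesB n.toNat, PySem.List.pyRange_one]
    have hln : (((n.toNat:Nat):Int) + 1 - 1).toNat = n.toNat := by omega
    rw [hln, List.map_map]
    refine List.map_congr_left (fun k hk => ?_)
    have hkn : k < n.toNat := List.mem_range.mp hk
    have hidx : ((1:Int) + (k:Int)) = (((k+1 : Nat)):Int) := by push_cast; ring
    have hpw : PySem.List.pyGetD ((List.range (n.toNat+1)).map pwF) (((k+1:Nat)):Int) 0 = pwF (k+1) := by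
      rw [PySem.List.pyGetD_natCast]
      exact PySem.List.getD_map_range pwF (n.toNat+1) (k+1) 0 (by omega)
    have hgs : PySem.List.pyGetD ((List.range (n.toNat+1)).map gsF) (((k+1:Nat)):Int) 0 = gsF (k+1) := by
      rw [PySem.List.pyGetD_natCast]
      exact PySem.List.getD_map_range gsF (n.toNat+1) (k+1) 0 (by omega)
    simp only [Function.comp_apply, hidx, hpw, hgs, closed_state, pvSample]
  · have hn0 : n.toNat = 0 := by omega
    have hnil : PySem.List.pyRange 1 (n+1) 1 = [] := PySem.List.pyRange_one_eq_nil (by omega)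
    unfold noise_seed_alt
    rw [hnil, hn0]
    simp

-- ===== VERDICT (by name: the statement is the Claim_ definition above) =====
theorem noise_seed_spec : Claim_equal_noise_seed := by
  intro n amp seed _ _
  unfold Spec_noise_seed noise_seed
  rw [altB_eq, loopA_eq]
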